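-- pv_equiv track=rewrite | github.com/vilelabruno/morepizza_hashcode | code/initSol.py | orderedSol
-- ===== SOURCE A (Python) =====
-- def orderedSol(slycesArr, slycesArr_, slMax):
--     summ = 0
--     solution = []
--     for pizza in slycesArr:
--         summ += pizza
--         if summ > slMax:
--             break
--         solution.append(slycesArr_.index(pizza))
--     return solution
-- ===== SOURCE B (Python) =====
-- def orderedSol(slycesArr, slycesArr_, slMax):
--     # Pass 1: prefix sums
--     prefixes = []
--     s = 0
--     for x in slycesArr:
--         s += x
--         prefixes.append(s)
--     # Pass 2: cutoff = number of leading prefix sums within slMax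
--     count = 0
--     while count < len(prefixes) and prefixes[count] <= slMax:
--         count += 1
--     # Pass 3: map kept elements to their first-occurrence index
--     return [slycesArr_.index(p) for p in slycesArr[:count]]
-- ===== Notes on version B (the rewrite author's own statement) =====
-- stated objective: alternative
-- what changed: Replaces A's single fused loop (running sum + break + append inside one pass) by three separate passes: a prefix-sum pass, a cutoff count over the prefix sums, and a map of the kept slice to first-occurrence indices.
import Mathlib
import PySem

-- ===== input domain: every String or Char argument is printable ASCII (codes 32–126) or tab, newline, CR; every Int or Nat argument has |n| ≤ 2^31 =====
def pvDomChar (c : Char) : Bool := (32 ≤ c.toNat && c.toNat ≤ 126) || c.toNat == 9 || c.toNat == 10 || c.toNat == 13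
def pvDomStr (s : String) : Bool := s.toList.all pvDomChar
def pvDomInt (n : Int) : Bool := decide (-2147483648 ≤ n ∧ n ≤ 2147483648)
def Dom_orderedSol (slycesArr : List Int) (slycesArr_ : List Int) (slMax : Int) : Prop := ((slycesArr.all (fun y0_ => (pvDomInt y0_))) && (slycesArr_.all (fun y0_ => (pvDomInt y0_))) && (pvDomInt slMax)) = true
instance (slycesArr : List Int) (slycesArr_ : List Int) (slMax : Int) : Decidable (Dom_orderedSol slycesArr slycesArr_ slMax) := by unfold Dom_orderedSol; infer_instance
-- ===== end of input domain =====

-- B recomputes the same result in three separate passes (prefix sums, cutoff count, index map)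
-- instead of A's single fused loop; equivalence is about the return value, same cost class.

-- ===== PORT A =====
-- A's loop: running sum, break on summ > slMax, append slycesArr_.index(pizza).
-- '.index' raises ValueError when the element is absent; that case is excluded by Pre_,
-- the port uses '.getD 0' there (never reached inside Pre_).
def orderedSolLoop (slycesArr_ : List Int) (slMax : Int) : List Int → Int → List Int
  | [], _ => []
  | pizza :: rest, summ =>
    let summ' := summ + pizza
    if summ' > slMax then []
    else Int.ofNat ((PySem.List.index? slycesArr_ pizza).getD 0) :: orderedSolLoop slycesArr_ slMax rest summ'

def orderedSol (slycesArr : List Int) (slycesArr_ : List Int) (slMax : Int) : List Int :=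
  orderedSolLoop slycesArr_ slMax slycesArr 0

-- ===== PORT B =====
-- Pass 1 of Source B: prefix sums
def prefixSums : List Int → Int → List Int
  | [], _ => []
  | x :: rest, s => (s + x) :: prefixSums rest (s + x)

-- Pass 2 of Source B: how many leading prefix sums are ≤ slMax (the while loop)
def cutoffCount (slMax : Int) : List Int → Nat
  | [] => 0
  | p :: rest => if p ≤ slMax then cutoffCount slMax rest + 1 else 0

def orderedSol_alt (slycesArr : List Int) (slycesArr_ : List Int) (slMax : Int) : List Int :=
  let prefixes := prefixSums slycesArr 0
  let count := cutoffCount slMax prefixes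
  (slycesArr.take count).map (fun p => Int.ofNat ((PySem.List.index? slycesArr_ p).getD 0))

-- ===== PRECONDITION & SPEC =====
-- Pre_ excludes exactly the inputs where A raises ValueError: some element of slycesArr that is
-- still appended (all cumulative sums up to it are ≤ slMax) is absent from slycesArr_.
def Pre_orderedSol (slycesArr : List Int) (slycesArr_ : List Int) (slMax : Int) : Prop :=
  ∀ i ∈ List.range slycesArr.length,
    (∀ j ∈ List.range (i + 1), (slycesArr.take (j + 1)).sum ≤ slMax) →
    slycesArr.getD i 0 ∈ slycesArr_
instance (slycesArr : List Int) (slycesArr_ : List Int) (slMax : Int) : Decidable (Pre_orderedSol slycesArr slycesArr_ slMax) := by unfold Pre_orderedSol; infer_instance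

def pvWitness_orderedSol : List Int × List Int × Int := ([2, 3, 10], [3, 2, 5], 6)

def Spec_orderedSol (slycesArr : List Int) (slycesArr_ : List Int) (slMax : Int) (out : List Int) : Prop := out = orderedSol_alt slycesArr slycesArr_ slMax
instance (slycesArr : List Int) (slycesArr_ : List Int) (slMax : Int) (out : List Int) : Decidable (Spec_orderedSol slycesArr slycesArr_ slMax out) := by unfold Spec_orderedSol; infer_instance

-- ===== CLAIM (what is proved, stated in full; the proofs are below) =====
def Claim_equal_orderedSol : Prop := ∀ (slycesArr : List Int) (slycesArr_ : List Int) (slMax : Int), Dom_orderedSol slycesArr slycesArr_ slMax → Pre_orderedSol slycesArr slycesArr_ slMax → Spec_orderedSol slycesArr slycesArr_ slMax (orderedSol slycesArr slycesArr_ slMax)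

-- ===== LEMMAS AND PROOFS =====
theorem loop_eq_take_map (slycesArr_ : List Int) (slMax : Int) :
    ∀ (xs : List Int) (s : Int),
      orderedSolLoop slycesArr_ slMax xs s =
        (xs.take (cutoffCount slMax (prefixSums xs s))).map
          (fun p => Int.ofNat ((PySem.List.index? slycesArr_ p).getD 0)) := by
  intro xs
  induction xs with
  | nil => intro s; rfl
  | cons x rest ih =>
    intro s
    simp only [orderedSolLoop, prefixSums, cutoffCount]
    by_cases h : s + x ≤ slMax
    · simp [h, not_lt.mpr h, List.take_succ_cons, ih (s + x)]
    · simp [h, lt_of_not_ge h]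

theorem orderedSol_spec : Claim_equal_orderedSol := by
  intro slycesArr slycesArr_ slMax _ _
  unfold Spec_orderedSol orderedSol orderedSol_alt
  exact loop_eq_take_map slycesArr_ slMax slycesArr 0
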